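-- pv_equiv track=rewrite | github.com/moon23k/NLP_Datasets | web_crawling/himym.py | split_dialog
-- ===== SOURCE A (Python) =====
-- def split_dialog(script, char):
--     dialog = []
--     prior_char, prior_uttr = '', ''
--
--     for dial in script:
--         for line in dial['dialogue']:
--             curr_char = line.split(':')[0].lower().strip()
--             curr_uttr = ''.join(line.split(':')[1:]).strip()
--
--             if not prior_char:
--                 if curr_char == char:
--                     continue
--
--                 prior_char = curr_char
--                 prior_uttr = curr_uttr
--                 continue
--
--             if prior_char != char and curr_char == char:
--                 temp = dict()
--                 temp['x'] = prior_uttr.lower()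
--                 temp['y'] = curr_uttr.lower()
--
--                 dialog.append(temp)
--
--             prior_char = curr_char
--             prior_uttr = curr_uttr
--
--     return dialog
-- ===== SOURCE B (Python) =====
-- def split_dialog(script, char):
--     def parse(line):
--         parts = line.split(':')
--         return (parts[0].lower().strip(), ''.join(parts[1:]).strip())
--
--     flat = [parse(line) for dial in script for line in dial['dialogue']]
--     return [{'x': p[1].lower(), 'y': c[1].lower()}
--             for p, c in zip(flat, flat[1:])
--             if p[0] and p[0] != char and c[0] == char]
-- ===== Notes on version B (the rewrite author's own statement) =====
-- stated objective: alternative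
-- what changed: Replaces A's mutable prior-speaker state machine (nested loops threading prior_char/prior_uttr with skip/continue logic) by a two-pass form: materialize one flattened list of parsed (speaker, utterance) pairs, then a sliding window over adjacent pairs (zip with its tail) emitting {'x','y'} whenever the previous speaker is non-empty, differs from char, and the current speaker is char.
import Mathlib
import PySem

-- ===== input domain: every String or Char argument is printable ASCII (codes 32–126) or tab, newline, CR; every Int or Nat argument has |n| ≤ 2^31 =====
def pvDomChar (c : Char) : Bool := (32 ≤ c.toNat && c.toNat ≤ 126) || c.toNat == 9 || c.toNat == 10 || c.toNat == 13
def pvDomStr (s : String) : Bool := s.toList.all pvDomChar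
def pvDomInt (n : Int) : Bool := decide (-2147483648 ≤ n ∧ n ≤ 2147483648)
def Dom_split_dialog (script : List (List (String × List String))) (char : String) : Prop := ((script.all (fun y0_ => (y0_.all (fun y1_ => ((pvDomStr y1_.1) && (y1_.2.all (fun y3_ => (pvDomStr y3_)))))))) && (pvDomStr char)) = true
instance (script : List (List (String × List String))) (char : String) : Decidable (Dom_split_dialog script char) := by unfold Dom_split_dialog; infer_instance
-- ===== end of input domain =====

-- B replaces A's mutable prior-speaker state machine by a materialize-then-sliding-window
-- two-pass form (flatten and parse all lines, then scan adjacent pairs); same cost, different shape.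

-- ===== PORT A =====
-- A's nested loops threading the mutable state (dialog, prior_char, prior_uttr); the two
-- `continue`s in the empty-prior branch become the two arms that return the state unchanged
-- resp. updated without appending.
def split_dialog (script : List (List (String × List String))) (char : String) : List (List (String × String)) :=
  (script.foldl
    (fun st dial =>
      (PySem.Dict.getD (PySem.Dict.mk dial) "dialogue" []).foldl
        (fun st line =>
          let curr_char := PySem.Str.strip (PySem.Str.lower (PySem.List.pyGetD ((PySem.Str.split? line ":").getD []) 0 ""))
          let curr_uttr := PySem.Str.strip (PySem.Str.join "" (PySem.List.slice ((PySem.Str.split? line ":").getD []) (some 1) none))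
          if st.2.1 = "" then
            if curr_char = char then st
            else (st.1, curr_char, curr_uttr)
          else
            ((if st.2.1 ≠ char ∧ curr_char = char then
                st.1 ++ [[("x", PySem.Str.lower st.2.2), ("y", PySem.Str.lower curr_uttr)]]
              else st.1),
             curr_char, curr_uttr))
        st)
    (([] : List (List (String × String))), "", "")).1

-- ===== PORT B =====
-- Source B's parse helper
def pvParse (line : String) : String × String :=
  (PySem.Str.strip (PySem.Str.lower (PySem.List.pyGetD ((PySem.Str.split? line ":").getD []) 0 "")),
   PySem.Str.strip (PySem.Str.join "" (PySem.List.slice ((PySem.Str.split? line ":").getD []) (some 1) none)))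

def split_dialog_alt (script : List (List (String × List String))) (char : String) : List (List (String × String)) :=
  let flat := (script.flatMap (fun dial => PySem.Dict.getD (PySem.Dict.mk dial) "dialogue" [])).map pvParse
  (flat.zip (PySem.List.slice flat (some 1) none)).filterMap
    (fun pc =>
      if pc.1.1 ≠ "" ∧ pc.1.1 ≠ char ∧ pc.2.1 = char then
        some [("x", PySem.Str.lower pc.1.2), ("y", PySem.Str.lower pc.2.2)]
      else none)

-- ===== PRECONDITION & SPEC =====
-- Pre_ excludes exactly the scripts containing an entry without a "dialogue" key, on which
-- both Pythons raise KeyError at dial['dialogue'].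
def Pre_split_dialog (script : List (List (String × List String))) (char : String) : Prop :=
  ∀ dial ∈ script, "dialogue" ∈ dial.map Prod.fst
instance (script : List (List (String × List String))) (char : String) : Decidable (Pre_split_dialog script char) := by unfold Pre_split_dialog; infer_instance

def pvWitness_split_dialog : (List (List (String × List String))) × String :=
  ([[("dialogue", ["Bob: hi there", "Alice: yo"])], [("dialogue", ["bob:later", "alice: ok!"])]], "alice")

def Spec_split_dialog (script : List (List (String × List String))) (char : String) (out : List (List (String × String))) : Prop := out = split_dialog_alt script char
instance (script : List (List (String × List String))) (char : String) (out : List (List (String × String))) : Decidable (Spec_split_dialog script char out) := by unfold Spec_split_dialog; infer_instance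

-- ===== CLAIM (what is proved, stated in full; the proofs are below) =====
def Claim_equal_split_dialog : Prop := ∀ (script : List (List (String × List String))) (char : String), Dom_split_dialog script char → Pre_split_dialog script char → Spec_split_dialog script char (split_dialog script char)

-- ===== LEMMAS AND PROOFS =====

-- B's sliding window, as a function of the flattened parsed list (drop 1 = the [1:] slice).
def pvPairs (char : String) (l : List (String × String)) : List (List (String × String)) :=
  (l.zip (l.drop 1)).filterMap
    (fun pc =>
      if pc.1.1 ≠ "" ∧ pc.1.1 ≠ char ∧ pc.2.1 = char then
        some [("x", PySem.Str.lower pc.1.2), ("y", PySem.Str.lower pc.2.2)]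
      else none)

-- A's per-line transition, factored through pvParse.
def pvStep (char : String) (st : List (List (String × String)) × String × String)
    (p : String × String) : List (List (String × String)) × String × String :=
  if st.2.1 = "" then
    if p.1 = char then st
    else (st.1, p.1, p.2)
  else
    ((if st.2.1 ≠ char ∧ p.1 = char then
        st.1 ++ [[("x", PySem.Str.lower st.2.2), ("y", PySem.Str.lower p.2)]]
      else st.1),
     p.1, p.2)

lemma pvPairs_cons_cons (char : String) (p q : String × String) (l : List (String × String)) :
    pvPairs char (p :: q :: l) =
      (if p.1 ≠ "" ∧ p.1 ≠ char ∧ q.1 = char then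
        [[("x", PySem.Str.lower p.2), ("y", PySem.Str.lower q.2)]] else []) ++ pvPairs char (q :: l) := by
  simp only [pvPairs, List.drop_one, List.tail_cons, List.zip_cons_cons, List.filterMap_cons]
  split_ifs <;> simp

-- a head that can never act as a valid "prior" (empty speaker, or speaker = char) contributes nothing
lemma pvPairs_cons_skip (char : String) (p : String × String) (l : List (String × String))
    (h : p.1 = "" ∨ p.1 = char) : pvPairs char (p :: l) = pvPairs char l := by
  cases l with
  | nil => rfl
  | cons q l =>
      rw [pvPairs_cons_cons]
      rcases h with h | h <;> simp [h]

-- A's loop over the flattened parsed list computes B's sliding window, with the running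
-- prior state acting as a virtual element prepended in front.
lemma pvRun_eq (char : String) :
    ∀ (l : List (String × String)) (acc : List (List (String × String))) (pc pu : String),
      (l.foldl (pvStep char) (acc, pc, pu)).1 = acc ++ pvPairs char ((pc, pu) :: l) := by
  intro l
  induction l with
  | nil => intro acc pc pu; simp [pvPairs]
  | cons q l ih =>
      intro acc pc pu
      rw [List.foldl_cons]
      by_cases hpc : pc = ""
      · by_cases hq : q.1 = char
        · have hstep : pvStep char (acc, pc, pu) q = (acc, pc, pu) := by
            simp [pvStep, hpc, hq]
          rw [hstep, ih acc pc pu,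
              pvPairs_cons_skip char (pc, pu) (q :: l) (Or.inl hpc),
              pvPairs_cons_skip char q l (Or.inr hq),
              pvPairs_cons_skip char (pc, pu) l (Or.inl hpc)]
        · have hstep : pvStep char (acc, pc, pu) q = (acc, q.1, q.2) := by
            simp [pvStep, hpc, hq]
          rw [hstep, ih acc q.1 q.2, Prod.mk.eta,
              pvPairs_cons_skip char (pc, pu) (q :: l) (Or.inl hpc)]
      · have hstep : pvStep char (acc, pc, pu) q =
            ((if pc ≠ char ∧ q.1 = char then
                acc ++ [[("x", PySem.Str.lower pu), ("y", PySem.Str.lower q.2)]] else acc),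
             q.1, q.2) := by
          simp [pvStep, hpc]
        rw [hstep, ih _ q.1 q.2, Prod.mk.eta, pvPairs_cons_cons]
        by_cases hcond : pc ≠ char ∧ q.1 = char
        · simp [hcond, hpc]
        · simp [hcond, hpc]

-- A's nested foldl, rewritten over the flattened list of parsed pairs
lemma split_dialog_eq_run (script : List (List (String × List String))) (char : String) :
    split_dialog script char =
      ((((script.flatMap (fun dial => PySem.Dict.getD (PySem.Dict.mk dial) "dialogue" [])).map
          pvParse).foldl (pvStep char) ([], "", "")).1 : List (List (String × String))) := by
  rw [List.foldl_map, List.foldl_flatMap]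
  rfl

lemma split_dialog_alt_eq_pairs (script : List (List (String × List String))) (char : String) :
    split_dialog_alt script char =
      pvPairs char
        ((script.flatMap (fun dial => PySem.Dict.getD (PySem.Dict.mk dial) "dialogue" [])).map
          pvParse) := by
  simp [split_dialog_alt, pvPairs, PySem.List.slice_from_one, List.drop_one]

-- ===== VERDICT (by name: the statement is the Claim_ definition above) =====
theorem split_dialog_spec : Claim_equal_split_dialog := by
  intro script char _hdom _hpre
  show split_dialog script char = split_dialog_alt script char
  rw [split_dialog_eq_run, split_dialog_alt_eq_pairs, pvRun_eq]
  rw [pvPairs_cons_skip char _ _ (Or.inl rfl)]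
  simp
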